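-- pv_equiv track=rewrite | github.com/DuchessFlame/dfbnb-data | src/build_titles_json.py | merge_rows_by_key
-- ===== SOURCE A (Python) =====
-- from typing import Any, Dict, List, Optional, Tuple
--
-- def merge_rows_by_key(row_sets: List[List[Dict[str, str]]], key_field: str) -> List[Dict[str, str]]:
--     merged: Dict[str, Dict[str, str]] = {}
--     for rows in row_sets:
--         for r in rows:
--             k = (r.get(key_field) or "").strip()
--             if not k:
--                 continue
--             if k not in merged:
--                 merged[k] = dict(r)
--             else:
--                 merged[k].update({kk: vv for kk, vv in r.items() if vv is not None})
--     return list(merged.values())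
-- ===== SOURCE B (Python) =====
-- from typing import Dict, List
--
--
-- def _merge_group(rows: List[Dict[str, str]]) -> Dict[str, str]:
--     base = dict(rows[0])
--     for r in rows[1:]:
--         base.update({kk: vv for kk, vv in r.items() if vv is not None})
--     return base
--
--
-- def merge_rows_by_key(row_sets: List[List[Dict[str, str]]], key_field: str) -> List[Dict[str, str]]:
--     # Phase 1: group rows by their non-empty stripped key, first-seen order.
--     groups: Dict[str, List[Dict[str, str]]] = {}
--     for rows in row_sets:
--         for r in rows:
--             k = (r.get(key_field) or "").strip()
--             if k:
--                 groups.setdefault(k, []).append(r)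
--     # Phase 2: fold each group into one merged dict.
--     return [_merge_group(rows) for rows in groups.values()]
-- ===== Notes on version B (the rewrite author's own statement) =====
-- stated objective: simpler
-- what changed: A merges every row into an accumulator dict inside one nested loop; B first groups rows by their non-empty stripped key into an order-preserving dict of lists, then folds each group into one merged dict.
import Mathlib
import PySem

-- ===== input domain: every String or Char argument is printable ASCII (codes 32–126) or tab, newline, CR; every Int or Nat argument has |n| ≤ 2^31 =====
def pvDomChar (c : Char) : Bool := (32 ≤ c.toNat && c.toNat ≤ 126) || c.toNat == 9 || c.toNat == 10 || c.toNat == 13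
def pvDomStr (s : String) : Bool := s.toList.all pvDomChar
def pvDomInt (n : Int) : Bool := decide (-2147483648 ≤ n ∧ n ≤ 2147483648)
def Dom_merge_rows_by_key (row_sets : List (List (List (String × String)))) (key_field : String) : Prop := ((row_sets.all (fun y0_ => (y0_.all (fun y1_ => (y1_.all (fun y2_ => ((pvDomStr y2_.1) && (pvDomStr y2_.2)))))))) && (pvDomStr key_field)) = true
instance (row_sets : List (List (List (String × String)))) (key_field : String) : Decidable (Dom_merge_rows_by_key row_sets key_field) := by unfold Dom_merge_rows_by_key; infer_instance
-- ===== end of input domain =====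

-- B splits A's single accumulate-into-merged loop into a grouping pass (key → list of rows)
-- followed by a per-group fold; same output, 'simpler' decomposition, no speed claim.

-- ===== PORT A =====
-- k = (r.get(key_field) or "").strip(): a value "" is falsy, so `or ""` equals .get's default "".
def pvRowKey (key_field : String) (r : List (String × String)) : String :=
  PySem.Str.strip (((PySem.Dict.mk r).get? key_field).getD "")

-- one iteration of A's inner loop body; values are String (never None) under the type
-- convention, so `{kk: vv for kk, vv in r.items() if vv is not None}` is all of r.items(),
-- and merged[k].update(...) is modify at the key k (which A has just checked is present,
-- so the `Dict.empty` default is never consulted).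
def pvStepA (key_field : String)
    (merged : PySem.Dict String (PySem.Dict String String)) (r : List (String × String)) :
    PySem.Dict String (PySem.Dict String String) :=
  let k := pvRowKey key_field r
  if k = "" then merged
  else if merged.contains k then
    merged.modify k PySem.Dict.empty (fun d => d.update r)
  else merged.insert k (PySem.Dict.ofList r)

def merge_rows_by_key (row_sets : List (List (List (String × String)))) (key_field : String) :
    List (List (String × String)) :=
  let merged := row_sets.foldl
    (fun merged rows => rows.foldl (pvStepA key_field) merged) PySem.Dict.empty
  merged.values.map PySem.Dict.items

-- ===== PORT B =====
-- B's helper _merge_group: dict(rows[0]) then update with each remaining row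
-- (the [] case is unreachable from the grouping pass; Dict.empty is its natural total value).
def pvMergeGroup (rows : List (List (String × String))) : PySem.Dict String String :=
  match rows with
  | [] => PySem.Dict.empty
  | r0 :: rest => rest.foldl (fun d r => d.update r) (PySem.Dict.ofList r0)

-- groups.setdefault(k, []).append(r) : groups[k] = groups.get(k, []) ++ [r]
def pvStepB (key_field : String)
    (groups : PySem.Dict String (List (List (String × String)))) (r : List (String × String)) :
    PySem.Dict String (List (List (String × String))) :=
  let k := pvRowKey key_field r
  if k = "" then groups
  else groups.modify k [] (fun rs => rs ++ [r])

def merge_rows_by_key_alt (row_sets : List (List (List (String × String)))) (key_field : String) :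
    List (List (String × String)) :=
  let groups := row_sets.foldl
    (fun groups rows => rows.foldl (pvStepB key_field) groups) PySem.Dict.empty
  groups.values.map (fun rows => (pvMergeGroup rows).items)

-- ===== PRECONDITION & SPEC =====
def Spec_merge_rows_by_key (row_sets : List (List (List (String × String)))) (key_field : String) (out : List (List (String × String))) : Prop := out = merge_rows_by_key_alt row_sets key_field
instance (row_sets : List (List (List (String × String)))) (key_field : String) (out : List (List (String × String))) : Decidable (Spec_merge_rows_by_key row_sets key_field out) := by unfold Spec_merge_rows_by_key; infer_instance

-- ===== CLAIM (what is proved, stated in full; the proofs are below) =====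
def Claim_equal_merge_rows_by_key : Prop := ∀ (row_sets : List (List (List (String × String)))) (key_field : String), Dom_merge_rows_by_key row_sets key_field → Spec_merge_rows_by_key row_sets key_field (merge_rows_by_key row_sets key_field)

-- ===== LEMMAS AND PROOFS =====

-- map a groups-dict to A's merged-dict by folding every group
def pvMapVals (g : PySem.Dict String (List (List (String × String)))) :
    PySem.Dict String (PySem.Dict String String) :=
  PySem.Dict.mk (g.items.map (fun p => (p.1, pvMergeGroup p.2)))

theorem pvContains_mapVals (g : PySem.Dict String (List (List (String × String)))) (k : String) :
    (pvMapVals g).contains k = g.contains k := by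
  simp [pvMapVals, PySem.Dict.contains, List.any_map, Function.comp_def]

theorem pvGet?_mapVals (g : PySem.Dict String (List (List (String × String)))) (k : String) :
    (pvMapVals g).get? k = (g.get? k).map pvMergeGroup := by
  simp only [pvMapVals, PySem.Dict.get?, List.find?_map, Function.comp_def, Option.map_map]

theorem pvMergeGroup_append (rows : List (List (String × String))) (r : List (String × String)) :
    pvMergeGroup (rows ++ [r]) = (pvMergeGroup rows).update r := by
  cases rows with
  | nil => rfl
  | cons r0 rest => simp [pvMergeGroup, List.foldl_append]

theorem pvStep_comm (key_field : String)
    (g : PySem.Dict String (List (List (String × String)))) (r : List (String × String)) :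
    pvStepA key_field (pvMapVals g) r = pvMapVals (pvStepB key_field g r) := by
  unfold pvStepA pvStepB
  set k := pvRowKey key_field r with hkdef
  by_cases hk : k = ""
  · simp [hk]
  · simp only [hk, if_false]
    have hget : ((pvMapVals g).getD k PySem.Dict.empty).update r
        = pvMergeGroup (g.getD k [] ++ [r]) := by
      rw [pvMergeGroup_append]
      congr 1
      rw [PySem.Dict.getD_eq_get?_getD, PySem.Dict.getD_eq_get?_getD, pvGet?_mapVals]
      cases g.get? k <;> rfl
    rw [PySem.Dict.modify, PySem.Dict.modify]
    apply PySem.Dict.ext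
    by_cases hc : g.contains k = true
    · rw [pvContains_mapVals, if_pos hc]
      rw [PySem.Dict.items_insert_of_contains _ _ (by rw [pvContains_mapVals]; exact hc)]
      have hmv : (pvMapVals (g.insert k (g.getD k [] ++ [r]))).items
          = (g.insert k (g.getD k [] ++ [r])).items.map (fun p => (p.1, pvMergeGroup p.2)) := rfl
      rw [hmv, PySem.Dict.items_insert_of_contains _ _ hc]
      have hitems : (pvMapVals g).items = g.items.map (fun p => (p.1, pvMergeGroup p.2)) := rfl
      rw [hitems, List.map_map, List.map_map]
      apply List.map_congr_left
      intro p _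
      simp only [Function.comp_def]
      by_cases hp : p.1 = k
      · simp [hp, hget]
      · simp [hp]
    · have hc' : g.contains k = false := by simpa using hc
      rw [pvContains_mapVals, if_neg (by simp [hc'])]
      rw [PySem.Dict.items_insert_of_not_contains _ _ (by rw [pvContains_mapVals]; exact hc')]
      have hmv : (pvMapVals (g.insert k (g.getD k [] ++ [r]))).items
          = (g.insert k (g.getD k [] ++ [r])).items.map (fun p => (p.1, pvMergeGroup p.2)) := rfl
      rw [hmv, PySem.Dict.items_insert_of_not_contains _ _ hc',
        PySem.Dict.getD_of_not_contains _ _ hc']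
      have hitems : (pvMapVals g).items = g.items.map (fun p => (p.1, pvMergeGroup p.2)) := rfl
      rw [hitems, List.map_append]
      rfl

theorem pvFoldl_comm (key_field : String) (rows : List (List (String × String)))
    (g : PySem.Dict String (List (List (String × String)))) :
    rows.foldl (pvStepA key_field) (pvMapVals g)
      = pvMapVals (rows.foldl (pvStepB key_field) g) := by
  induction rows generalizing g with
  | nil => rfl
  | cons r rest ih => simp only [List.foldl_cons, pvStep_comm]; exact ih _

theorem pvFoldl2_comm (key_field : String) (row_sets : List (List (List (String × String))))
    (g : PySem.Dict String (List (List (String × String)))) :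
    row_sets.foldl (fun m rows => rows.foldl (pvStepA key_field) m) (pvMapVals g)
      = pvMapVals (row_sets.foldl (fun m rows => rows.foldl (pvStepB key_field) m) g) := by
  induction row_sets generalizing g with
  | nil => rfl
  | cons rows rest ih => simp only [List.foldl_cons, pvFoldl_comm]; exact ih _

-- ===== VERDICT (by name: the statement is the Claim_ definition above) =====
theorem merge_rows_by_key_spec : Claim_equal_merge_rows_by_key := by
  intro row_sets key_field _
  unfold Spec_merge_rows_by_key merge_rows_by_key merge_rows_by_key_alt
  have he : pvMapVals PySem.Dict.empty = PySem.Dict.empty := rfl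
  have h := pvFoldl2_comm key_field row_sets PySem.Dict.empty
  rw [he] at h
  simp only [h]
  simp [pvMapVals, PySem.Dict.values, List.map_map, Function.comp_def]
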